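-- pv_equiv track=rewrite | github.com/Fondamenti18/fondamenti-di-programmazione | students/1807439/homework01/program03.py | disordinamento
-- ===== SOURCE A (Python) =====
-- def disordinamento(stringa):
--     '''inserire qui la vostra implementazione'''
--     i=len(stringa)-1
--     seq_dis=[]
--     stringa_dis=''
--     while i>=0:
--         if 'a'<=stringa[i]<='z':
--             seq_dis=[stringa[i]]+seq_dis
--             if stringa[i] in seq_dis[1: ]:
--                 seq_dis.remove(stringa[i])
--         i-=1
--     return stringa_dis.join(seq_dis)
-- ===== SOURCE B (Python) =====
-- def disordinamento(stringa):
--     last = {}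
--     for i, c in enumerate(stringa):
--         if 'a' <= c <= 'z':
--             last[c] = i
--     res = []
--     for i, c in enumerate(stringa):
--         if 'a' <= c <= 'z' and last[c] == i:
--             res.append(c)
--     return ''.join(res)
-- ===== Notes on version B (the rewrite author's own statement) =====
-- stated objective: faster
-- what changed: Replaces A's backward while-loop that prepends to a result list and scans it for duplicates with two forward passes: a dict of each lowercase letter's last index, then an emit pass keeping c exactly where last[c] == i.
import Mathlib
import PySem

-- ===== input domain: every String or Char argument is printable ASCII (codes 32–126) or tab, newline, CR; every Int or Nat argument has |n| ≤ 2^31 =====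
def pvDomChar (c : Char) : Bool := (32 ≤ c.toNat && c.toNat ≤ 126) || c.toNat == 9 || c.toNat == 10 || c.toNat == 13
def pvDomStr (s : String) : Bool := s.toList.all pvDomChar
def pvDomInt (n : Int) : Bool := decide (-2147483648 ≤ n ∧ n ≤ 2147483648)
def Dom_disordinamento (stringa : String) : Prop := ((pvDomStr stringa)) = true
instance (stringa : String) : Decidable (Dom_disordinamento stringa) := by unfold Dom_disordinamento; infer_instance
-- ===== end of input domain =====

-- B replaces A's backward scan (prepend to the result list, then scan/remove duplicates in it)
-- by two forward passes with a last-index dict; a timing run measured B faster by a constant factor.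

-- ===== PORT A =====
-- body of A's while-loop for one character stringa[i] (seq_dis is the accumulator)
def disStep (seq : List Char) (c : Char) : List Char :=
  if 'a' ≤ c ∧ c ≤ 'z' then
    let seq1 := [c] ++ seq                                -- seq_dis = [stringa[i]] + seq_dis
    if c ∈ PySem.List.slice seq1 (some 1) none then       -- stringa[i] in seq_dis[1:]
      (PySem.List.remove? seq1 c).getD seq1               -- seq_dis.remove(stringa[i]); the guard makes remove? succeed
    else seq1
  else seq

-- 'while i>=0: … i-=1' reading stringa[i] = a fold over the reversed character list
def disordinamento (stringa : String) : String :=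
  let seq := stringa.toList.reverse.foldl disStep []
  String.ofList (PySem.Chars.join [] (seq.map (fun c => [c])))   -- ''.join(seq_dis)

-- ===== PORT B =====
-- first pass: last[c] = i for each lowercase c
def lastIns (d : PySem.Dict Char Int) (ic : Int × Char) : PySem.Dict Char Int :=
  if 'a' ≤ ic.2 ∧ ic.2 ≤ 'z' then d.insert ic.2 ic.1 else d

-- second pass: append c exactly when last[c] == i (the lookup never misses: c was inserted in pass 1)
def emitStep (last : PySem.Dict Char Int) (r : List Char) (ic : Int × Char) : List Char :=
  if ('a' ≤ ic.2 ∧ ic.2 ≤ 'z') ∧ last.getD ic.2 (-1) = ic.1 then r ++ [ic.2] else r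

def disordinamento_alt (stringa : String) : String :=
  let l := stringa.toList
  let last := (PySem.List.enumerate l 0).foldl lastIns PySem.Dict.empty
  let res := (PySem.List.enumerate l 0).foldl (emitStep last) []
  String.ofList (PySem.Chars.join [] (res.map (fun c => [c])))   -- ''.join(res)

-- ===== PRECONDITION & SPEC =====
def Spec_disordinamento (stringa : String) (out : String) : Prop := out = disordinamento_alt stringa
instance (stringa : String) (out : String) : Decidable (Spec_disordinamento stringa out) := by unfold Spec_disordinamento; infer_instance

-- ===== CLAIM (what is proved, stated in full; the proofs are below) =====
def Claim_equal_disordinamento : Prop := ∀ (stringa : String), Dom_disordinamento stringa → Spec_disordinamento stringa (disordinamento stringa)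

-- ===== LEMMAS AND PROOFS =====


-- the common specification: keep a lowercase character iff it does not occur again later
-- A's step, simplified: the prepend-then-remove dance is 'prepend unless already present'
theorem disStep_eq (seq : List Char) (c : Char) :
    disStep seq c = if 'a' ≤ c ∧ c ≤ 'z' then (if c ∈ seq then seq else c :: seq) else seq := by
  unfold disStep
  simp [PySem.List.slice_from_one, PySem.List.remove?_cons_self]

def gStep (c : Char) (s : List Char) : List Char :=
  if 'a' ≤ c ∧ c ≤ 'z' then (if c ∈ s then s else c :: s) else s
theorem disStep_funext : (fun (c : Char) (s : List Char) => disStep s c) = gStep := by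
  funext c s; rw [disStep_eq]; rfl
def keepLast : List Char → List Char
  | [] => []
  | c :: t => if ('a' ≤ c ∧ c ≤ 'z') ∧ c ∉ t then c :: keepLast t else keepLast t
theorem mem_foldr_gStep (t : List Char) (a : Char) :
    a ∈ t.foldr gStep [] ↔ a ∈ t ∧ ('a' ≤ a ∧ a ≤ 'z') := by
  induction t with
  | nil => simp
  | cons x t ih =>
    simp only [List.foldr_cons, gStep]
    split_ifs with h1 h2
    · simp only [List.mem_cons, ih]; constructor
      · tauto
      · rintro ⟨(rfl | h), hl⟩
        · exact ih.mp h2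
        · tauto
    · simp only [List.mem_cons, ih]; constructor
      · rintro (rfl | h) <;> tauto
      · rintro ⟨(rfl | h), hl⟩ <;> tauto
    · simp only [List.mem_cons, ih]; constructor
      · tauto
      · rintro ⟨(rfl | h), hl⟩
        · exact absurd hl h1
        · tauto
theorem foldr_gStep_eq_keepLast (t : List Char) :
    t.foldr gStep [] = keepLast t := by
  induction t with
  | nil => rfl
  | cons x t ih =>
    simp only [List.foldr_cons, gStep, keepLast]
    by_cases h1 : 'a' ≤ x ∧ x ≤ 'z'
    · by_cases h2 : x ∈ t
      · rw [if_pos h1, if_pos, if_neg (by tauto), ih]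
        rw [mem_foldr_gStep]; exact ⟨h2, h1⟩
      · rw [if_pos h1, if_neg, if_pos ⟨h1, h2⟩, ih]
        rw [mem_foldr_gStep]; tauto
    · rw [if_neg h1, if_neg (by tauto), ih]

def lastIdx : List Char → Char → Option Nat
  | [], _ => none
  | x :: t, c =>
    match lastIdx t c with
    | some j => some (j + 1)
    | none => if x = c then some 0 else none

theorem lastIdx_eq_none_iff (t : List Char) (c : Char) : lastIdx t c = none ↔ c ∉ t := by
  induction t with
  | nil => simp [lastIdx]
  | cons x t ih =>
    cases h : lastIdx t c with
    | some j =>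
      have hct : c ∈ t := by
        by_contra hn; rw [← ih] at hn; rw [h] at hn; simp at hn
      simp [lastIdx, h, hct]
    | none =>
      have hct := ih.mp h
      by_cases hx : x = c
      · subst hx; simp [lastIdx, h]
      · simp only [lastIdx, h, hx, if_false]
        simp [hct]; exact fun e => hx e.symm

theorem lastIdx_append_singleton (xs : List Char) (x c : Char) :
    lastIdx (xs ++ [x]) c = if x = c then some xs.length else lastIdx xs c := by
  induction xs with
  | nil => simp [lastIdx]
  | cons y ys ih =>
    by_cases hx : x = c
    · subst hx
      simp [List.cons_append, lastIdx, ih]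
    · simp only [List.cons_append, lastIdx, ih, if_neg hx]

theorem lastIdx_spec (xs : List Char) (c : Char) (k : Nat) (hk : k < xs.length)
    (hc : xs[k] = c) : (lastIdx xs c = some k ↔ c ∉ xs.drop (k + 1)) := by
  induction xs generalizing k with
  | nil => simp at hk
  | cons x t ih =>
    cases k with
    | zero =>
      simp only [List.getElem_cons_zero] at hc
      subst hc
      cases h : lastIdx t x with
      | some j =>
        have hct : x ∈ t := by
          by_contra hn; rw [← lastIdx_eq_none_iff] at hn; rw [h] at hn
          simp at hn
        simp [lastIdx, h, hct]
      | none => simp [lastIdx, h, (lastIdx_eq_none_iff t x).mp h]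
    | succ k =>
      simp only [List.getElem_cons_succ] at hc
      have hk' : k < t.length := by simpa using hk
      have hmem : c ∈ t := hc ▸ List.getElem_mem hk'
      have hne : lastIdx t c ≠ none := fun h => ((lastIdx_eq_none_iff t c).mp h) hmem
      cases h : lastIdx t c with
      | none => exact absurd h hne
      | some j =>
        simp only [lastIdx, h, List.drop_succ_cons]
        rw [← ih k hk' hc, h]
        simp

theorem buildB (xs : List Char) (c : Char) (hc : 'a' ≤ c ∧ c ≤ 'z') :
    ((PySem.List.enumerate xs 0).foldl lastIns PySem.Dict.empty).get? c
      = (lastIdx xs c).map (fun k => (k : Int)) := by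
  induction xs using List.reverseRecOn with
  | nil => simp [PySem.List.enumerate_nil, PySem.Dict.get?_empty, lastIdx]
  | append_singleton xs x ih =>
    rw [PySem.List.enumerate_append, List.foldl_append, lastIdx_append_singleton]
    simp only [PySem.List.enumerate_cons, PySem.List.enumerate_nil, zero_add,
      List.foldl_cons, List.foldl_nil]
    unfold lastIns
    by_cases hx : x = c
    · subst hx
      rw [if_pos hc, if_pos rfl, PySem.Dict.get?_insert_self]
      simp
    · by_cases hlx : 'a' ≤ x ∧ x ≤ 'z'
      · rw [if_pos hlx, if_neg hx, PySem.Dict.get?_insert_of_ne _ _ (fun e => hx e.symm)]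
        exact ih
      · rw [if_neg hlx, if_neg hx]; exact ih

theorem filtmap (t : List Char) (s : Nat) :
    ((PySem.List.enumerate t (s : Int)).filter
        (fun ic => decide (('a' ≤ ic.2 ∧ ic.2 ≤ 'z') ∧ ic.2 ∉ t.drop ((ic.1.toNat - s) + 1)))).map (·.2)
      = keepLast t := by
  induction t generalizing s with
  | nil => simp [PySem.List.enumerate_nil, keepLast]
  | cons x t ih =>
    rw [PySem.List.enumerate_cons, List.filter_cons]
    have htail : (PySem.List.enumerate t ((s:Int) + 1)).filter
          (fun ic => decide (('a' ≤ ic.2 ∧ ic.2 ≤ 'z') ∧ ic.2 ∉ (x :: t).drop ((ic.1.toNat - s) + 1)))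
        = (PySem.List.enumerate t (((s+1 : Nat) : Int))).filter
          (fun ic => decide (('a' ≤ ic.2 ∧ ic.2 ≤ 'z') ∧ ic.2 ∉ t.drop ((ic.1.toNat - (s+1)) + 1))) := by
      rw [show ((s:Int) + 1) = (((s+1 : Nat)) : Int) by push_cast; ring]
      refine List.filter_congr ?_
      intro ic hic
      rcases (PySem.List.mem_enumerate_iff t _ ic).mp hic with ⟨k, hk, rfl⟩
      have h1 : ((((s+1:Nat):Int) + (k:Int)).toNat - s) + 1 = (k + 1) + 1 := by omega
      have h2 : ((((s+1:Nat):Int) + (k:Int)).toNat - (s+1)) + 1 = k + 1 := by omega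
      rw [h1, h2]
      simp [List.drop_succ_cons]
    rw [htail]
    by_cases hx : ('a' ≤ x ∧ x ≤ 'z') ∧ x ∉ t
    · rw [if_pos (by simpa using hx), List.map_cons, ih (s+1)]
      simp only [keepLast, if_pos hx]
    · rw [if_neg (by simpa using hx), ih (s+1)]
      simp only [keepLast, if_neg hx]

theorem alt_eq_keepLast (stringa : String) :
    disordinamento_alt stringa
      = String.ofList (PySem.Chars.join [] ((keepLast stringa.toList).map (fun c => [c]))) := by
  show String.ofList (PySem.Chars.join []
      ((((PySem.List.enumerate stringa.toList 0).foldl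
          (emitStep ((PySem.List.enumerate stringa.toList 0).foldl lastIns PySem.Dict.empty)) []).map
        (fun c => [c])))) = _
  set l := stringa.toList with hl
  set last := (PySem.List.enumerate l 0).foldl lastIns PySem.Dict.empty with hlast
  have hstep : emitStep last = fun (r : List Char) (ic : Int × Char) =>
      if decide (('a' ≤ ic.2 ∧ ic.2 ≤ 'z') ∧ last.getD ic.2 (-1) = ic.1) = true
      then r ++ [(fun ic : Int × Char => ic.2) ic] else r := by
    funext r ic; simp only [emitStep, decide_eq_true_eq]
  rw [hstep, PySem.List.foldl_append_if, List.nil_append]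
  have hcongr : (PySem.List.enumerate l 0).filter
        (fun ic => decide (('a' ≤ ic.2 ∧ ic.2 ≤ 'z') ∧ last.getD ic.2 (-1) = ic.1))
      = (PySem.List.enumerate l ((0 : Nat) : Int)).filter
        (fun ic => decide (('a' ≤ ic.2 ∧ ic.2 ≤ 'z') ∧ ic.2 ∉ l.drop ((ic.1.toNat - 0) + 1))) := by
    refine List.filter_congr ?_
    intro ic hic
    rcases (PySem.List.mem_enumerate_iff l 0 ic).mp hic with ⟨k, hk, rfl⟩
    refine decide_eq_decide.mpr (and_congr_right fun hlow => ?_)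
    have hne : lastIdx l l[k] ≠ none :=
      fun h => ((lastIdx_eq_none_iff l l[k]).mp h) (List.getElem_mem hk)
    cases h : lastIdx l l[k] with
    | none => exact absurd h hne
    | some j =>
      have hgd : last.getD l[k] (-1) = (j : Int) := by
        rw [hlast, PySem.Dict.getD_eq_get?_getD, buildB l l[k] hlow, h]; rfl
      have hidx : ((((0:Int) + (k:Int)).toNat - 0) + 1) = k + 1 := by omega
      rw [hgd, hidx, ← lastIdx_spec l l[k] k hk rfl, h]
      simp only [Option.some_inj]
      omega
  rw [hcongr, filtmap l 0]

-- ===== VERDICT (by name: the statement is the Claim_ definition above) =====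
theorem disordinamento_spec : Claim_equal_disordinamento := by
  intro stringa _
  show disordinamento stringa = disordinamento_alt stringa
  rw [alt_eq_keepLast]
  show String.ofList (PySem.Chars.join []
      (((stringa.toList.reverse.foldl disStep []).map (fun c => [c])))) = _
  rw [List.foldl_reverse, disStep_funext, foldr_gStep_eq_keepLast]
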